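-- pv_equiv track=rewrite | github.com/jkkbek/-intelligent-trainer | app.py | build_weekly_grouped_plan
-- ===== SOURCE A (Python) =====
-- def build_weekly_grouped_plan(plans):
--     week_days = [
--         "Monday",
--         "Tuesday",
--         "Wednesday",
--         "Thursday",
--         "Friday",
--         "Saturday",
--         "Sunday",
--     ]
--     grouped = {day: [] for day in week_days}
--
--     for item in plans:
--         day = item.get("day_of_week", "")
--         if day in grouped:
--             grouped[day].append(item)
--
--     return grouped
-- ===== SOURCE B (Python) =====
-- def build_weekly_grouped_plan(plans):
--     week_days = [
--         "Monday",
--         "Tuesday",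
--         "Wednesday",
--         "Thursday",
--         "Friday",
--         "Saturday",
--         "Sunday",
--     ]
--     return {day: [it for it in plans if it.get("day_of_week", "") == day]
--             for day in week_days}
-- ===== Notes on version B (the rewrite author's own statement) =====
-- stated objective: simpler
-- what changed: Replaces the single pass that dispatches each item into a pre-built mutable bucket dict with a dict comprehension that, for each of the seven weekday names, selects its items by scanning plans (nested scan instead of one-pass dispatch).
import Mathlib
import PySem

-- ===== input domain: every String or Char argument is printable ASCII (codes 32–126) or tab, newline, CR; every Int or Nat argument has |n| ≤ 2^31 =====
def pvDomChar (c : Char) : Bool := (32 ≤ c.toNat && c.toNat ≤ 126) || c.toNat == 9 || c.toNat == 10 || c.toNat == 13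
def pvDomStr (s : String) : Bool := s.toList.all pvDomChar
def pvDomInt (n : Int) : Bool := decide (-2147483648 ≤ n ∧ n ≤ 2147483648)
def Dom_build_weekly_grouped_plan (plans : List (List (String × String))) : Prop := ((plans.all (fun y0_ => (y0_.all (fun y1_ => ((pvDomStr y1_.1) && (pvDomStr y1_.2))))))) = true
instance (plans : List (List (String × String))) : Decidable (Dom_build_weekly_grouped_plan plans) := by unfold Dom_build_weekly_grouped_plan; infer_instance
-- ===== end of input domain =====

-- B replaces A's single-pass dispatch into a mutable bucket dict by a per-weekday
-- comprehension that filters plans for each of the seven day names (objective: simpler).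

-- ===== PORT A =====
-- week_days (the same local list both Pythons write out)
def pvWeekDays : List String :=
  ["Monday", "Tuesday", "Wednesday", "Thursday", "Friday", "Saturday", "Sunday"]

-- item.get("day_of_week", "")  (item is a Python dict, first-match association lookup)
def pvDay (item : List (String × String)) : String :=
  (PySem.Dict.mk item).getD "day_of_week" ""

def build_weekly_grouped_plan (plans : List (List (String × String))) :
    List (String × List (List (String × String))) :=
  -- grouped = {day: [] for day in week_days}
  let grouped : PySem.Dict String (List (List (String × String))) :=
    pvWeekDays.foldl (fun d day => d.insert day []) PySem.Dict.empty
  -- for item in plans: day = item.get(...); if day in grouped: grouped[day].append(item)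
  let grouped := plans.foldl
    (fun g item =>
      let day := pvDay item
      if g.contains day then g.modify day [] (fun l => l ++ [item]) else g)
    grouped
  grouped.items

-- ===== PORT B =====
def build_weekly_grouped_plan_alt (plans : List (List (String × String))) :
    List (String × List (List (String × String))) :=
  pvWeekDays.map (fun day => (day, plans.filter (fun it => pvDay it == day)))

-- ===== PRECONDITION & SPEC =====
def Spec_build_weekly_grouped_plan (plans : List (List (String × String))) (out : List (String × List (List (String × String)))) : Prop := out = build_weekly_grouped_plan_alt plans
instance (plans : List (List (String × String))) (out : List (String × List (List (String × String)))) : Decidable (Spec_build_weekly_grouped_plan plans out) := by unfold Spec_build_weekly_grouped_plan; infer_instance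

-- ===== CLAIM (what is proved, stated in full; the proofs are below) =====
def Claim_equal_build_weekly_grouped_plan : Prop := ∀ (plans : List (List (String × String))), Dom_build_weekly_grouped_plan plans → Spec_build_weekly_grouped_plan plans (build_weekly_grouped_plan plans)

-- ===== LEMMAS AND PROOFS =====

-- A's dispatch loop, started on a dict whose items are (d, g d) for the nodup keys W,
-- ends with each bucket extended by exactly the items whose day equals its key.
theorem pvLoop (W : List String) (hW : W.Nodup)
    (plans : List (List (String × String)))
    (g : String → List (List (String × String))) :
    plans.foldl
      (fun gr item =>
        let day := pvDay item
        if gr.contains day then gr.modify day [] (fun l => l ++ [item]) else gr)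
      (PySem.Dict.mk (W.map (fun d => (d, g d))))
    = PySem.Dict.mk
        (W.map (fun d => (d, g d ++ plans.filter (fun it => pvDay it == d)))) := by
  induction plans generalizing g with
  | nil => simp
  | cons it rest ih =>
    simp only [List.foldl_cons]
    by_cases h : pvDay it ∈ W
    · have hc : (PySem.Dict.mk (W.map (fun d => (d, g d)))).contains (pvDay it) = true := by
        simp only [PySem.Dict.contains_mk, List.any_eq_true]
        exact ⟨(pvDay it, g (pvDay it)), List.mem_map_of_mem h, by simp⟩
      have hkeys : (PySem.Dict.mk (W.map (fun d => (d, g d)))).keys.Nodup := by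
        simpa [PySem.Dict.keys, Function.comp_def] using hW
      have hgd : (PySem.Dict.mk (W.map (fun d => (d, g d)))).getD (pvDay it) [] = g (pvDay it) := by
        have hmem : (pvDay it, g (pvDay it)) ∈ (PySem.Dict.mk (W.map (fun d => (d, g d)))).items := by
          simpa using List.mem_map_of_mem (f := fun d => (d, g d)) h
        rw [PySem.Dict.getD_eq_get?_getD,
            PySem.Dict.get?_of_mem_items _ hmem hkeys]
        rfl
      have hstep :
          (PySem.Dict.mk (W.map (fun d => (d, g d)))).modify (pvDay it) [] (fun l => l ++ [it])
          = PySem.Dict.mk (W.map (fun d =>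
              (d, g d ++ (if pvDay it == d then [it] else [])))) := by
        apply PySem.Dict.ext
        rw [PySem.Dict.modify, hgd, PySem.Dict.items_insert_of_contains _ _ hc]
        simp only [List.map_map]
        apply List.map_congr_left
        intro d _
        by_cases hd : d = pvDay it
        · subst hd; simp
        · simp [hd, Ne.symm hd, beq_iff_eq]

      simp only [hc, if_pos, hstep]
      rw [ih (fun d => g d ++ (if pvDay it == d then [it] else []))]
      congr 1
      apply List.map_congr_left
      intro d _
      by_cases hd : pvDay it = d <;> simp [hd]
    · have hc : (PySem.Dict.mk (W.map (fun d => (d, g d)))).contains (pvDay it) = false := by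
        simp only [PySem.Dict.contains_mk, List.any_eq_false]
        intro p hp
        simp only [List.mem_map] at hp
        obtain ⟨d, hd, rfl⟩ := hp
        intro hdd
        exact absurd ((eq_of_beq hdd) ▸ hd) h
      simp only [hc, Bool.false_eq_true, if_false]
      rw [ih g]
      congr 1
      apply List.map_congr_left
      intro d hd
      have hbe : (pvDay it == d) = false :=
        beq_eq_false_iff_ne.mpr (fun hdd => absurd (hdd ▸ hd) h)
      simp [hbe]

theorem pvInit :
    pvWeekDays.foldl (fun d day => d.insert day []) PySem.Dict.empty
    = PySem.Dict.mk (pvWeekDays.map (fun d =>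
        (d, ([] : List (List (String × String)))))) := by
  decide

-- ===== VERDICT (by name: the statement is the Claim_ definition above) =====
theorem build_weekly_grouped_plan_spec : Claim_equal_build_weekly_grouped_plan := by
  intro plans _
  show build_weekly_grouped_plan plans = build_weekly_grouped_plan_alt plans
  unfold build_weekly_grouped_plan build_weekly_grouped_plan_alt
  have hl := pvLoop pvWeekDays (by decide) plans (fun _ => [])
  rw [pvInit]
  simp only [hl]
  simp
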